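-- pv_equiv track=rewrite | github.com/Gygrus/WDI-ASD-course-Python | Semestr I/zestaw_6/cw9.py | czy_mozliwe
-- ===== SOURCE A (Python) =====
-- def czy_mozliwe(T, masa, i, tab1, tab2, mode):
--     tab1 = tab1[:]
--     tab2 = tab2[:]
--     if sum(tab1) == sum(tab2) + masa:
--         return True
--     if i == len(T):
--         return False
--
--     else:
--         if mode == 0:
--             tab1.append(T[i])
--         if mode == 1:
--             tab2.append(T[i])
--
--
--         return czy_mozliwe(T, masa, i +1, tab1, tab2, 0) or czy_mozliwe(T, masa, i+1, tab1, tab2, 1) or czy_mozliwe(T, masa, i+1, tab1, tab2, 2)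
-- ===== SOURCE B (Python) =====
-- def czy_mozliwe(T, masa, i, tab1, tab2, mode):
--     d0 = sum(tab1) - sum(tab2)
--     if d0 == masa:
--         return True
--     if i == len(T):
--         return False
--     if mode == 0:
--         d0 += T[i]
--     elif mode == 1:
--         d0 -= T[i]
--     target = masa - d0
--     reach = {0}
--     for x in T[i+1:]:
--         reach = {r + s for r in reach for s in (x, -x, 0)}
--     return target in reach
-- ===== Notes on version B (the rewrite author's own statement) =====
-- stated objective: alternative
-- what changed: Replaced the O(3^n) branching recursion (try +/-/skip for every element, recomputing list sums at each node) by a single forward pass maintaining the set of reachable signed sums of T[i+1:] (subset-sum style DP), followed by one membership test; pseudo-polynomial in the magnitude of the values.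
-- outside the precondition, e.g. on czy_mozliwe([1, 2], 3, -2, [], [], 2): A returns True, B returns False
import Mathlib
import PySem

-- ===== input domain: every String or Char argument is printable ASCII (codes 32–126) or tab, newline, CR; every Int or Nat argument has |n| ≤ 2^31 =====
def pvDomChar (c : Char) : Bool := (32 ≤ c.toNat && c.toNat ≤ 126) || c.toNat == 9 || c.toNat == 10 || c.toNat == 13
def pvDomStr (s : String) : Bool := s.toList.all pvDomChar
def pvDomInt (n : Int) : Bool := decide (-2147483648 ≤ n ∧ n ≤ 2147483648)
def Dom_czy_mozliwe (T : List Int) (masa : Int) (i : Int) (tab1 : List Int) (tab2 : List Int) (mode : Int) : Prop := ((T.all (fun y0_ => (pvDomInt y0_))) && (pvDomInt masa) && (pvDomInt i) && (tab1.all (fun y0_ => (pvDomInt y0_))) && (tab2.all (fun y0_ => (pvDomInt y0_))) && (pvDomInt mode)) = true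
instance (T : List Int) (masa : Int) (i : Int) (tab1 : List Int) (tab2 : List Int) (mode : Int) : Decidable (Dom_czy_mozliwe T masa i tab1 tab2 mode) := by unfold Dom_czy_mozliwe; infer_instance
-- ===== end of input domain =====

-- B replaces A's sign-branching recursion by a subset-sum style DP over the set of
-- reachable signed sums (objective: alternative algorithm).

-- ===== PORT A =====
-- Fuel-based transliteration of A's recursion (fuel only makes the recursion total;
-- within Pre_ the initial fuel is always sufficient, and where Python would raise
-- IndexError (pyGet? = none) the port returns false — such inputs are outside Pre_).
def czyGoA (T : List Int) (masa : Int) (fuel : Nat) (i : Int) (tab1 : List Int) (tab2 : List Int) (mode : Int) : Bool :=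
  match fuel with
  | 0 => false
  | Nat.succ fuel =>
    if tab1.sum = tab2.sum + masa then true
    else if i = (T.length : Int) then false
    else
      match (if mode = 0 ∨ mode = 1 then PySem.List.pyGet? T i else some 0) with
      | none => false
      | some x =>
        let tab1' := if mode = 0 then tab1 ++ [x] else tab1
        let tab2' := if mode = 1 then tab2 ++ [x] else tab2
        czyGoA T masa fuel (i+1) tab1' tab2' 0 || czyGoA T masa fuel (i+1) tab1' tab2' 1 ||
          czyGoA T masa fuel (i+1) tab1' tab2' 2

def czy_mozliwe (T : List Int) (masa : Int) (i : Int) (tab1 : List Int) (tab2 : List Int) (mode : Int) : Bool :=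
  czyGoA T masa (((T.length : Int) - i).toNat + 1) i tab1 tab2 mode

-- ===== PORT B =====
def czy_mozliwe_alt (T : List Int) (masa : Int) (i : Int) (tab1 : List Int) (tab2 : List Int) (mode : Int) : Bool :=
  let d0 := tab1.sum - tab2.sum
  if d0 = masa then true
  else if i = (T.length : Int) then false
  else
    let d1 := if mode = 0 then d0 + PySem.List.pyGetD T i 0
              else if mode = 1 then d0 - PySem.List.pyGetD T i 0
              else d0
    let target := masa - d1
    let reach : PySem.Set Int :=
      (PySem.List.slice T (some (i + 1)) none).foldl
        (fun reach x => PySem.Set.ofList (reach.flatMap (fun r => [r + x, r - x, r])))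
        (PySem.Set.ofList [0])
    PySem.Set.contains reach target

-- ===== PRECONDITION & SPEC =====
-- Pre_ admits every i in [0, len(T)], plus any input whose initial sums already match
-- (there both programs return True at once, whatever i is). It excludes other i outside
-- [0, len(T)]: for i > len(T) A raises IndexError, and for negative i A's value rests on
-- Python's negative-index wraparound, an accidental corner (e.g. ([1,2],3,-2,[],[],2):
-- A True, B False).
def Pre_czy_mozliwe (T : List Int) (masa : Int) (i : Int) (tab1 : List Int) (tab2 : List Int) (mode : Int) : Prop :=
  (0 ≤ i ∧ i ≤ (T.length : Int)) ∨ tab1.sum = tab2.sum + masa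
instance (T : List Int) (masa : Int) (i : Int) (tab1 : List Int) (tab2 : List Int) (mode : Int) : Decidable (Pre_czy_mozliwe T masa i tab1 tab2 mode) := by unfold Pre_czy_mozliwe; infer_instance

def pvWitness_czy_mozliwe : List Int × Int × Int × List Int × List Int × Int := ([1, 2], 1, 0, [], [], 2)

def Spec_czy_mozliwe (T : List Int) (masa : Int) (i : Int) (tab1 : List Int) (tab2 : List Int) (mode : Int) (out : Bool) : Prop := out = czy_mozliwe_alt T masa i tab1 tab2 mode
instance (T : List Int) (masa : Int) (i : Int) (tab1 : List Int) (tab2 : List Int) (mode : Int) (out : Bool) : Decidable (Spec_czy_mozliwe T masa i tab1 tab2 mode out) := by unfold Spec_czy_mozliwe; infer_instance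

-- ===== CLAIM (what is proved, stated in full; the proofs are below) =====
def Claim_equal_czy_mozliwe : Prop := ∀ (T : List Int) (masa : Int) (i : Int) (tab1 : List Int) (tab2 : List Int) (mode : Int), Dom_czy_mozliwe T masa i tab1 tab2 mode → Pre_czy_mozliwe T masa i tab1 tab2 mode → Spec_czy_mozliwe T masa i tab1 tab2 mode (czy_mozliwe T masa i tab1 tab2 mode)

-- ===== LEMMAS AND PROOFS =====

-- t is a sum Σ e_l · x_l with e_l ∈ {+1,-1,0} over the list
def canB : List Int → Int → Bool
  | [], t => decide (t = 0)
  | x :: L, t => canB L (t - x) || canB L (t + x) || canB L t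

theorem canB_zero (L : List Int) : canB L 0 = true := by
  induction L with
  | nil => simp [canB]
  | cons x L ih => simp [canB, ih]

-- membership in B's DP set after folding over L
theorem mem_fold_reach (L : List Int) : ∀ (S : List Int) (t : Int),
    t ∈ L.foldl (fun reach x => PySem.Set.ofList (reach.flatMap (fun r => [r + x, r - x, r]))) S
      ↔ ∃ s ∈ S, canB L (t - s) = true := by
  induction L with
  | nil => intro S t; simp [canB, sub_eq_zero, eq_comm]
  | cons x L ih =>
    intro S t
    rw [List.foldl_cons, ih]
    constructor
    · rintro ⟨s', hs', hcan⟩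
      rw [PySem.Set.mem_ofList, List.mem_flatMap] at hs'
      rcases hs' with ⟨r, hr, hm⟩
      refine ⟨r, hr, ?_⟩
      simp only [List.mem_cons, List.not_mem_nil, or_false] at hm
      rcases hm with h | h | h
      · subst h; simp [canB]; left; left
        have : t - (r + x) = t - r - x := by ring
        rw [← this]; exact hcan
      · subst h; simp [canB]; left; right
        have : t - (r - x) = t - r + x := by ring
        rw [← this]; exact hcan
      · subst h; simp [canB]; right; exact hcan
    · rintro ⟨s, hs, hcan⟩
      simp only [canB, Bool.or_eq_true] at hcan
      rcases hcan with (h | h) | h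
      · exact ⟨s + x, by rw [PySem.Set.mem_ofList, List.mem_flatMap]; exact ⟨s, hs, by simp⟩,
          by have : t - (s + x) = t - s - x := by ring
             rw [this]; exact h⟩
      · exact ⟨s - x, by rw [PySem.Set.mem_ofList, List.mem_flatMap]; exact ⟨s, hs, by simp⟩,
          by have : t - (s - x) = t - s + x := by ring
             rw [this]; exact h⟩
      · exact ⟨s, by rw [PySem.Set.mem_ofList, List.mem_flatMap]; exact ⟨s, hs, by simp⟩, h⟩

-- sign contribution of a mode
def sgnc (mode x : Int) : Int := if mode = 0 then x else if mode = 1 then -x else 0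


theorem or3_factor (D E a b c : Bool) :
    ((D || (E && a)) || (D || (E && b)) || (D || (E && c))) = (D || (E && (a || b || c))) := by
  cases D <;> cases E <;> cases a <;> cases b <;> cases c <;> rfl

theorem drop_canB_step (T : List Int) (j : Nat) (hj : j ≤ T.length) (t : Int) :
    (decide (t = 0) ||
      (decide (j < T.length) &&
        (canB (T.drop (j+1)) (t - PySem.List.pyGetD T (j : Int) 0) ||
         canB (T.drop (j+1)) (t + PySem.List.pyGetD T (j : Int) 0) ||
         canB (T.drop (j+1)) t))) = canB (T.drop j) t := by
  by_cases h : j < T.length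
  · have hd : T.drop j = T[j] :: T.drop (j+1) := List.drop_eq_getElem_cons h
    have hg : PySem.List.pyGetD T (j : Int) 0 = T[j] := by
      rw [PySem.List.pyGetD_natCast]
      exact List.getD_eq_getElem T 0 h
    rw [hd, hg]
    have hcons : canB (T[j] :: T.drop (j+1)) t =
        (canB (T.drop (j+1)) (t - T[j]) || canB (T.drop (j+1)) (t + T[j]) || canB (T.drop (j+1)) t) := rfl
    rw [hcons]
    simp only [h, decide_true, Bool.true_and]
    by_cases ht : t = 0
    · subst ht; simp [canB_zero]
    · simp [ht]
  · have hd : T.drop j = [] := List.drop_eq_nil_of_le (by omega)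
    simp [hd, canB, h]

theorem step_core (T : List Int) (masa : Int) (i : Int) (s1 s2 : Int)
    (h0 : 0 ≤ i) (hlt : i < (T.length : Int)) :
    ((decide (s1 = s2 + masa) || (decide (i+1 < (T.length : Int)) &&
        canB (T.drop ((i+1+1).toNat)) (masa - (s1 - s2) - sgnc 0 (PySem.List.pyGetD T (i+1) 0)))) ||
     (decide (s1 = s2 + masa) || (decide (i+1 < (T.length : Int)) &&
        canB (T.drop ((i+1+1).toNat)) (masa - (s1 - s2) - sgnc 1 (PySem.List.pyGetD T (i+1) 0)))) ||
     (decide (s1 = s2 + masa) || (decide (i+1 < (T.length : Int)) &&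
        canB (T.drop ((i+1+1).toNat)) (masa - (s1 - s2) - sgnc 2 (PySem.List.pyGetD T (i+1) 0)))))
    = canB (T.drop ((i+1).toNat)) (masa - (s1 - s2)) := by
  rw [or3_factor]
  set j : Nat := (i+1).toNat with hjdef
  have hji : (j : Int) = i + 1 := by omega
  have hj1 : (i+1+1).toNat = j + 1 := by omega
  have hjle : j ≤ T.length := by omega
  have hD : decide (s1 = s2 + masa) = decide (masa - (s1 - s2) = 0) := by
    rw [decide_eq_decide]; omega
  have hE : decide (i+1 < (T.length : Int)) = decide (j < T.length) := by
    rw [decide_eq_decide]; omega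
  have hy : PySem.List.pyGetD T (i+1) 0 = PySem.List.pyGetD T (j : Int) 0 := by rw [hji]
  rw [hD, hE, hj1, hy]
  have h0' : masa - (s1 - s2) - sgnc 0 (PySem.List.pyGetD T (j : Int) 0)
      = masa - (s1 - s2) - PySem.List.pyGetD T (j : Int) 0 := by simp [sgnc]
  have h1' : masa - (s1 - s2) - sgnc 1 (PySem.List.pyGetD T (j : Int) 0)
      = masa - (s1 - s2) + PySem.List.pyGetD T (j : Int) 0 := by simp [sgnc]
  have h2' : masa - (s1 - s2) - sgnc 2 (PySem.List.pyGetD T (j : Int) 0)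
      = masa - (s1 - s2) := by simp [sgnc]
  rw [h0', h1', h2']
  exact drop_canB_step T j hjle (masa - (s1 - s2))

-- characterisation of A's recursion within the fueled/pre region
theorem goA_eq (T : List Int) (masa : Int) : ∀ (fuel : Nat) (i : Int) (tab1 tab2 : List Int) (mode : Int),
    0 ≤ i → i ≤ (T.length : Int) → ((T.length : Int) - i).toNat < fuel →
    czyGoA T masa fuel i tab1 tab2 mode =
      (decide (tab1.sum = tab2.sum + masa) ||
        (decide (i < (T.length : Int)) &&
          canB (T.drop ((i + 1).toNat))
            (masa - (tab1.sum - tab2.sum) - sgnc mode (PySem.List.pyGetD T i 0)))) := by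
  intro fuel
  induction fuel with
  | zero => intro i tab1 tab2 mode h0 hle hf; omega
  | succ fuel ih =>
    intro i tab1 tab2 mode h0 hle hf
    rw [czyGoA]
    by_cases hs : tab1.sum = tab2.sum + masa
    · simp [hs]
    · by_cases hieq : i = (T.length : Int)
      · simp [hs, hieq]
      · have hlt : i < (T.length : Int) := lt_of_le_of_ne hle hieq
        have hjlt : i.toNat < T.length := by omega
        have hget : PySem.List.pyGet? T i = some (T[i.toNat]'hjlt) :=
          PySem.List.pyGet?_eq_some_getElem T h0 (by exact_mod_cast hlt)
        have hgetD : PySem.List.pyGetD T i 0 = T[i.toNat]'hjlt := by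
          exact PySem.List.pyGetD_eq_getElem T 0 h0 (by exact_mod_cast hlt)
        have hf' : ((T.length : Int) - (i+1)).toNat < fuel := by omega
        have h0' : (0:Int) ≤ i + 1 := by omega
        have hle' : i + 1 ≤ (T.length : Int) := by omega
        simp only [hs, if_false, hieq, decide_false, Bool.false_or]
        have hltd : decide (i < (T.length : Int)) = true := by simp [hlt]
        rw [hltd, Bool.true_and]
        by_cases hm0 : mode = 0
        · subst hm0
          norm_num [hget]
          rw [ih (i+1) (tab1 ++ [T[i.toNat]'hjlt]) tab2 0 h0' hle' hf',
              ih (i+1) (tab1 ++ [T[i.toNat]'hjlt]) tab2 1 h0' hle' hf',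
              ih (i+1) (tab1 ++ [T[i.toNat]'hjlt]) tab2 2 h0' hle' hf']
          rw [step_core T masa i (tab1 ++ [T[i.toNat]'hjlt]).sum tab2.sum h0 hlt]
          congr 1
          simp [List.sum_append, sgnc, hgetD]
          ring
        · by_cases hm1 : mode = 1
          · subst hm1
            norm_num [hget]
            rw [ih (i+1) tab1 (tab2 ++ [T[i.toNat]'hjlt]) 0 h0' hle' hf',
                ih (i+1) tab1 (tab2 ++ [T[i.toNat]'hjlt]) 1 h0' hle' hf',
                ih (i+1) tab1 (tab2 ++ [T[i.toNat]'hjlt]) 2 h0' hle' hf']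
            rw [step_core T masa i tab1.sum (tab2 ++ [T[i.toNat]'hjlt]).sum h0 hlt]
            congr 1
            simp [List.sum_append, sgnc, hgetD]
            ring
          · norm_num [hm0, hm1]
            rw [ih (i+1) tab1 tab2 0 h0' hle' hf',
                ih (i+1) tab1 tab2 1 h0' hle' hf',
                ih (i+1) tab1 tab2 2 h0' hle' hf']
            rw [step_core T masa i tab1.sum tab2.sum h0 hlt]
            congr 1
            simp [sgnc, hm0, hm1]



theorem contains_fold_eq_canB (L : List Int) (t : Int) :
    PySem.Set.contains
      (L.foldl (fun reach x => PySem.Set.ofList (reach.flatMap (fun r => [r + x, r - x, r])))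
        (PySem.Set.ofList [0])) t = canB L t := by
  rw [Bool.eq_iff_iff, PySem.Set.contains_iff, mem_fold_reach]
  constructor
  · rintro ⟨s, hs, hc⟩
    have : s = 0 := by
      have := (PySem.Set.mem_ofList (xs := [0]) (y := s)).mp hs
      simpa using this
    subst this
    simpa using hc
  · intro hc
    exact ⟨0, by rw [PySem.Set.mem_ofList]; simp, by simpa using hc⟩

theorem alt_eq (T : List Int) (masa : Int) (i : Int) (tab1 tab2 : List Int) (mode : Int)
    (h0 : 0 ≤ i) (hle : i ≤ (T.length : Int)) :
    czy_mozliwe_alt T masa i tab1 tab2 mode =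
      (decide (tab1.sum = tab2.sum + masa) ||
        (decide (i < (T.length : Int)) &&
          canB (T.drop ((i + 1).toNat))
            (masa - (tab1.sum - tab2.sum) - sgnc mode (PySem.List.pyGetD T i 0)))) := by
  unfold czy_mozliwe_alt
  by_cases hs : tab1.sum - tab2.sum = masa
  · rw [if_pos hs]
    have : decide (tab1.sum = tab2.sum + masa) = true := by rw [decide_eq_true_iff]; omega
    simp [this]
  · rw [if_neg hs]
    have hs' : decide (tab1.sum = tab2.sum + masa) = false := by
      rw [decide_eq_false_iff_not]; omega
    rw [hs', Bool.false_or]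
    by_cases hieq : i = (T.length : Int)
    · simp [hieq]
    · rw [if_neg hieq]
      have hlt : i < (T.length : Int) := lt_of_le_of_ne hle hieq
      rw [show decide (i < (T.length : Int)) = true from by simp [hlt], Bool.true_and]
      simp only [PySem.List.slice_from T (by omega : (0:Int) ≤ i + 1), contains_fold_eq_canB]
      congr 1
      unfold sgnc
      split_ifs <;> ring

theorem czy_mozliwe_spec : Claim_equal_czy_mozliwe := by
  intro T masa i tab1 tab2 mode _ hpre
  show czy_mozliwe T masa i tab1 tab2 mode = czy_mozliwe_alt T masa i tab1 tab2 mode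
  by_cases hs : tab1.sum = tab2.sum + masa
  · have hA : czy_mozliwe T masa i tab1 tab2 mode = true := by
      unfold czy_mozliwe czyGoA
      simp [hs]
    have hB : czy_mozliwe_alt T masa i tab1 tab2 mode = true := by
      unfold czy_mozliwe_alt
      simp only [if_pos (show tab1.sum - tab2.sum = masa by omega)]
    rw [hA, hB]
  · obtain ⟨h0, hle⟩ := hpre.resolve_right hs
    unfold czy_mozliwe
    rw [goA_eq T masa _ i tab1 tab2 mode h0 hle (by omega),
        alt_eq T masa i tab1 tab2 mode h0 hle]
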